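-- pv_equiv track=rewrite | github.com/eggylan/Optimization-Based-on-3D | old/基于三维点阵模型的邻块数据优化.py | find_largest_region
-- ===== SOURCE A (Python) =====
-- def is_continuous_region(blocks, x1, y1, z1, x2, y2, z2, block_name, state_string):
--
--     for x in range(x1, x2 + 1):
--         for y in range(y1, y2 + 1):
--             for z in range(z1, z2 + 1):
--                 if (x, y, z) not in blocks or blocks[(x, y, z)][0] != block_name or blocks[(x, y, z)][1] != state_string:
--                     return False
--     return True
--
-- def find_largest_region(blocks, start, block_name, state_string):
-- #匹配区块
--     x, y, z = start
--     x_end, y_end, z_end = x, y, z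
--
-- #寻找相邻
--     while is_continuous_region(blocks, x, y, z, x_end + 1, y_end, z_end, block_name, state_string):
--         x_end += 1
--     while is_continuous_region(blocks, x, y, z, x_end, y_end + 1, z_end, block_name, state_string):
--         y_end += 1
--     while is_continuous_region(blocks, x, y, z, x_end, y_end, z_end + 1, block_name, state_string):
--         z_end += 1
--
--     return (x, y, z), (x_end, y_end, z_end)
-- ===== SOURCE B (Python) =====
-- def find_largest_region(blocks, start, block_name, state_string):
--     x, y, z = start
--     target = (block_name, state_string)
--
--     # generic growth loop: extend the bound while every NEWLY added cell matches
--     def extend(e, new_cells):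
--         while all(blocks.get(c) == target for c in new_cells(e + 1)):
--             e += 1
--         return e
--
--     if blocks.get((x, y, z)) != target:
--         return (x, y, z), (x, y, z)
--
--     x_end = extend(x, lambda i: [(i, y, z)])
--     y_end = extend(y, lambda j: [(i, j, z) for i in range(x, x_end + 1)])
--     z_end = extend(z, lambda k: [(i, j, k) for i in range(x, x_end + 1)
--                                            for j in range(y, y_end + 1)])
--     return (x, y, z), (x_end, y_end, z_end)
-- ===== Notes on version B (the rewrite author's own statement) =====
-- stated objective: faster
-- what changed: B checks the start cell once and then grows each bound with one generic extend loop that tests only the newly added cell/row/slab against a single precomputed target pair, instead of A's three while loops each rescanning the whole box from the origin via is_continuous_region.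
import Mathlib
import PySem

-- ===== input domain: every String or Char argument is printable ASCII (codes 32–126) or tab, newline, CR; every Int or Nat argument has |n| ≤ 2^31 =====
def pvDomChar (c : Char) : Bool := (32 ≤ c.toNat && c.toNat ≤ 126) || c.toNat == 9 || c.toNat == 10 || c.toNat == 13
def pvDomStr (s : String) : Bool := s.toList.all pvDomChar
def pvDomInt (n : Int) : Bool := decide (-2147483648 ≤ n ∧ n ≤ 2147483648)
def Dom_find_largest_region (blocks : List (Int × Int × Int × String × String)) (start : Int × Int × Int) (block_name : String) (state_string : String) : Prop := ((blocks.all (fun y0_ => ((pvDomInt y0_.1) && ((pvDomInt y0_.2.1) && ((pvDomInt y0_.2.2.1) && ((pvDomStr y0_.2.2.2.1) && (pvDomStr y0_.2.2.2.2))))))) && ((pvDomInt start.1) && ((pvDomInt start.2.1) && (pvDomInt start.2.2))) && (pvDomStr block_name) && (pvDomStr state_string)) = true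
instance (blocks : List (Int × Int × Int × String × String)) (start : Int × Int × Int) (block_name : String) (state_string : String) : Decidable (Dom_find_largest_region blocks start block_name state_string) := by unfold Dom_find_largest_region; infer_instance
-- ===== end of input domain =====

-- B checks the start cell once and then grows each bound with one generic extend loop testing
-- only the newly added cell / row / slab, instead of rescanning the whole box (objective: faster).

-- ===== PORT A =====
-- blocks is a Python dict keyed by (x,y,z); lookup = first match in the association list.
def pvLookup : List (Int × Int × Int × String × String) → Int → Int → Int → Option (String × String)
  | [], _, _, _ => none
  | (a, b, c, n, s) :: rest, x, y, z =>
      if a = x ∧ b = y ∧ c = z then some (n, s) else pvLookup rest x y z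

-- '(x,y,z) in blocks and blocks[(x,y,z)][0] == name and blocks[(x,y,z)][1] == state'
-- (the negation of A's early-return condition inside the triple loop).
def pvCellOk (blocks : List (Int × Int × Int × String × String)) (bn ss : String) (x y z : Int) : Bool :=
  match pvLookup blocks x y z with
  | none => false
  | some (n, s) => n == bn && s == ss

-- is_continuous_region: triple for-loop with early 'return False' = all over the three ranges
def pvIcr (blocks : List (Int × Int × Int × String × String)) (x1 y1 z1 x2 y2 z2 : Int) (bn ss : String) : Bool :=
  (PySem.List.pyRange x1 (x2 + 1) 1).all fun x =>
    (PySem.List.pyRange y1 (y2 + 1) 1).all fun y =>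
      (PySem.List.pyRange z1 (z2 + 1) 1).all fun z =>
        pvCellOk blocks bn ss x y z

-- the three while loops of A, fuel-bounded (fuel = blocks.length + 1 always suffices:
-- each successful step needs a fresh key of blocks inside the grown box)
def pvWhileX (blocks : List (Int × Int × Int × String × String)) (x y z : Int) (bn ss : String) : Nat → Int → Int
  | 0, xe => xe
  | f + 1, xe =>
      if pvIcr blocks x y z (xe + 1) y z bn ss then pvWhileX blocks x y z bn ss f (xe + 1) else xe

def pvWhileY (blocks : List (Int × Int × Int × String × String)) (x y z xe : Int) (bn ss : String) : Nat → Int → Int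
  | 0, ye => ye
  | f + 1, ye =>
      if pvIcr blocks x y z xe (ye + 1) z bn ss then pvWhileY blocks x y z xe bn ss f (ye + 1) else ye

def pvWhileZ (blocks : List (Int × Int × Int × String × String)) (x y z xe ye : Int) (bn ss : String) : Nat → Int → Int
  | 0, ze => ze
  | f + 1, ze =>
      if pvIcr blocks x y z xe ye (ze + 1) bn ss then pvWhileZ blocks x y z xe ye bn ss f (ze + 1) else ze

def find_largest_region (blocks : List (Int × Int × Int × String × String)) (start : Int × Int × Int) (block_name : String) (state_string : String) : (Int × Int × Int) × (Int × Int × Int) :=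
  match start with
  | (x, y, z) =>
    let fuel := blocks.length + 1
    let xe := pvWhileX blocks x y z block_name state_string fuel x
    let ye := pvWhileY blocks x y z xe block_name state_string fuel y
    let ze := pvWhileZ blocks x y z xe ye block_name state_string fuel z
    ((x, y, z), (xe, ye, ze))

-- ===== PORT B =====
-- B views blocks as the dict it is: one PySem.Dict, looked up with .get? (= Python blocks.get).
def pvDict (blocks : List (Int × Int × Int × String × String)) : PySem.Dict (Int × Int × Int) (String × String) :=
  PySem.Dict.mk (blocks.map fun b => ((b.1, b.2.1, b.2.2.1), (b.2.2.2.1, b.2.2.2.2)))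

-- B's single generic growth loop: 'while all(blocks.get(c) == target for c in new_cells(e+1)): e += 1'
def pvExtend (d : PySem.Dict (Int × Int × Int) (String × String)) (target : String × String)
    (newCells : Int → List (Int × Int × Int)) : Nat → Int → Int
  | 0, e => e
  | f + 1, e =>
      if (newCells (e + 1)).all (fun c => d.get? c == some target) then
        pvExtend d target newCells f (e + 1)
      else e

def find_largest_region_alt (blocks : List (Int × Int × Int × String × String)) (start : Int × Int × Int) (block_name : String) (state_string : String) : (Int × Int × Int) × (Int × Int × Int) :=
  match start with
  | (x, y, z) =>
    let d := pvDict blocks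
    let target := (block_name, state_string)
    if d.get? (x, y, z) == some target then
      let fuel := blocks.length + 1
      let xe := pvExtend d target (fun i => [(i, y, z)]) fuel x
      let ye := pvExtend d target
        (fun j => (PySem.List.pyRange x (xe + 1) 1).map fun i => (i, j, z)) fuel y
      let ze := pvExtend d target
        (fun k => (PySem.List.pyRange x (xe + 1) 1).flatMap fun i =>
          (PySem.List.pyRange y (ye + 1) 1).map fun j => (i, j, k)) fuel z
      ((x, y, z), (xe, ye, ze))
    else ((x, y, z), (x, y, z))

-- ===== PRECONDITION & SPEC =====
def Spec_find_largest_region (blocks : List (Int × Int × Int × String × String)) (start : Int × Int × Int) (block_name : String) (state_string : String) (out : (Int × Int × Int) × (Int × Int × Int)) : Prop := out = find_largest_region_alt blocks start block_name state_string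
instance (blocks : List (Int × Int × Int × String × String)) (start : Int × Int × Int) (block_name : String) (state_string : String) (out : (Int × Int × Int) × (Int × Int × Int)) : Decidable (Spec_find_largest_region blocks start block_name state_string out) := by unfold Spec_find_largest_region; infer_instance

-- ===== CLAIM =====
def Claim_equal_find_largest_region : Prop := ∀ (blocks : List (Int × Int × Int × String × String)) (start : Int × Int × Int) (block_name : String) (state_string : String), Dom_find_largest_region blocks start block_name state_string → Spec_find_largest_region blocks start block_name state_string (find_largest_region blocks start block_name state_string)

-- ===== LEMMAS AND PROOFS =====

-- B's dict lookup-and-compare agrees with A's per-cell test.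
lemma get?_pvDict (blocks : List (Int × Int × Int × String × String)) (bn ss : String) (x y z : Int) :
    ((pvDict blocks).get? (x, y, z) == some (bn, ss)) = pvCellOk blocks bn ss x y z := by
  induction blocks with
  | nil => rfl
  | cons b t ih =>
      obtain ⟨a, b2, c, n, s⟩ := b
      simp only [pvDict, List.map_cons, PySem.Dict.get?_mk_cons] at *
      by_cases h : ((a, b2, c) : Int × Int × Int) = (x, y, z)
      · injection h with h1 h23
        injection h23 with h2 h3
        subst h1; subst h2; subst h3
        simp only [pvCellOk, pvLookup, BEq.rfl, and_self, if_pos trivial]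
        rfl
      · have hb : (((a, b2, c) : Int × Int × Int) == (x, y, z)) = false := by
          simpa using h
        have hcond : ¬ (a = x ∧ b2 = y ∧ c = z) := by
          intro ⟨e1, e2, e3⟩; exact h (by simp [e1, e2, e3])
        simp only [hb, Bool.false_eq_true, if_neg, not_false_iff]
        rw [ih]
        simp [pvCellOk, pvLookup, hcond]

lemma pv_all_and {α : Type} (l : List α) (p q : α → Bool) :
    (l.all fun a => p a && q a) = (l.all p && l.all q) := by
  induction l with
  | nil => rfl
  | cons a t ih =>
      simp only [List.all_cons, ih]
      cases p a <;> cases q a <;> cases t.all p <;> cases t.all q <;> rfl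

-- the row / slab tests of B, named for the proofs only
def pvRowAll (blocks : List (Int × Int × Int × String × String)) (bn ss : String) (x1 x2 yc zc : Int) : Bool :=
  (PySem.List.pyRange x1 (x2 + 1) 1).all fun i => pvCellOk blocks bn ss i yc zc

def pvSlabAll (blocks : List (Int × Int × Int × String × String)) (bn ss : String) (x1 x2 y1 y2 zc : Int) : Bool :=
  (PySem.List.pyRange x1 (x2 + 1) 1).all fun i =>
    (PySem.List.pyRange y1 (y2 + 1) 1).all fun j => pvCellOk blocks bn ss i j zc

lemma rowAll_eq (blocks : List (Int × Int × Int × String × String)) (bn ss : String) (x1 x2 yc zc : Int) :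
    (((PySem.List.pyRange x1 (x2 + 1) 1).map fun i => ((i, yc, zc) : Int × Int × Int)).all
        (fun c => (pvDict blocks).get? c == some (bn, ss)))
      = pvRowAll blocks bn ss x1 x2 yc zc := by
  simp only [pvRowAll, List.all_map, Function.comp_def, get?_pvDict]

lemma slabAll_eq (blocks : List (Int × Int × Int × String × String)) (bn ss : String) (x1 x2 y1 y2 zc : Int) :
    (((PySem.List.pyRange x1 (x2 + 1) 1).flatMap fun i =>
        (PySem.List.pyRange y1 (y2 + 1) 1).map fun j => ((i, j, zc) : Int × Int × Int)).all
        (fun c => (pvDict blocks).get? c == some (bn, ss)))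
      = pvSlabAll blocks bn ss x1 x2 y1 y2 zc := by
  simp only [pvSlabAll, List.all_flatMap, List.all_map, Function.comp_def, get?_pvDict]

lemma icr_self (blocks : List (Int × Int × Int × String × String)) (x y z : Int) (bn ss : String) :
    pvIcr blocks x y z x y z bn ss = pvCellOk blocks bn ss x y z := by
  simp [pvIcr, PySem.List.pyRange_one_singleton]

lemma icr_succ_x (blocks : List (Int × Int × Int × String × String)) (x y z xe : Int) (bn ss : String)
    (hx : x ≤ xe) :
    pvIcr blocks x y z (xe + 1) y z bn ss
      = (pvIcr blocks x y z xe y z bn ss && pvCellOk blocks bn ss (xe + 1) y z) := by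
  unfold pvIcr
  rw [PySem.List.pyRange_one_succ_right (by omega : x ≤ xe + 1)]
  simp [PySem.List.pyRange_one_singleton]

lemma icr_succ_y (blocks : List (Int × Int × Int × String × String)) (x y z xe ye : Int) (bn ss : String)
    (hy : y ≤ ye) :
    pvIcr blocks x y z xe (ye + 1) z bn ss
      = (pvIcr blocks x y z xe ye z bn ss && pvRowAll blocks bn ss x xe (ye + 1) z) := by
  unfold pvIcr pvRowAll
  rw [PySem.List.pyRange_one_succ_right (by omega : y ≤ ye + 1)]
  simp only [List.all_append, List.all_cons, List.all_nil, Bool.and_true]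
  rw [pv_all_and]
  simp [PySem.List.pyRange_one_singleton]

lemma icr_succ_z (blocks : List (Int × Int × Int × String × String)) (x y z xe ye ze : Int) (bn ss : String)
    (hz : z ≤ ze) :
    pvIcr blocks x y z xe ye (ze + 1) bn ss
      = (pvIcr blocks x y z xe ye ze bn ss && pvSlabAll blocks bn ss x xe y ye (ze + 1)) := by
  unfold pvIcr pvSlabAll
  rw [PySem.List.pyRange_one_succ_right (by omega : z ≤ ze + 1)]
  simp only [List.all_append, List.all_cons, List.all_nil, Bool.and_true, pv_all_and]

lemma lockX (blocks : List (Int × Int × Int × String × String)) (x y z : Int) (bn ss : String) :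
    ∀ (f : Nat) (xe : Int), x ≤ xe → pvIcr blocks x y z xe y z bn ss = true →
      pvWhileX blocks x y z bn ss f xe
          = pvExtend (pvDict blocks) (bn, ss) (fun i => [(i, y, z)]) f xe
      ∧ x ≤ pvWhileX blocks x y z bn ss f xe
      ∧ pvIcr blocks x y z (pvWhileX blocks x y z bn ss f xe) y z bn ss = true := by
  intro f
  induction f with
  | zero => intro xe hx hinv; exact ⟨rfl, hx, hinv⟩
  | succ f ih =>
      intro xe hx hinv
      simp only [pvWhileX, pvExtend, List.all_cons, List.all_nil, Bool.and_true, get?_pvDict]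
      rw [icr_succ_x blocks x y z xe bn ss hx, hinv, Bool.true_and]
      by_cases hc : pvCellOk blocks bn ss (xe + 1) y z = true
      · rw [if_pos hc, if_pos hc]
        exact ih (xe + 1) (by omega)
          (by simp [icr_succ_x blocks x y z xe bn ss hx, hinv, hc])
      · rw [if_neg hc, if_neg hc]
        exact ⟨rfl, hx, hinv⟩

lemma lockY (blocks : List (Int × Int × Int × String × String)) (x y z xe : Int) (bn ss : String) :
    ∀ (f : Nat) (ye : Int), y ≤ ye → pvIcr blocks x y z xe ye z bn ss = true →
      pvWhileY blocks x y z xe bn ss f ye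
          = pvExtend (pvDict blocks) (bn, ss)
              (fun j => (PySem.List.pyRange x (xe + 1) 1).map fun i => (i, j, z)) f ye
      ∧ y ≤ pvWhileY blocks x y z xe bn ss f ye
      ∧ pvIcr blocks x y z xe (pvWhileY blocks x y z xe bn ss f ye) z bn ss = true := by
  intro f
  induction f with
  | zero => intro ye hy hinv; exact ⟨rfl, hy, hinv⟩
  | succ f ih =>
      intro ye hy hinv
      simp only [pvWhileY, pvExtend, rowAll_eq]
      rw [icr_succ_y blocks x y z xe ye bn ss hy, hinv, Bool.true_and]
      by_cases hc : pvRowAll blocks bn ss x xe (ye + 1) z = true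
      · rw [if_pos hc, if_pos hc]
        exact ih (ye + 1) (by omega)
          (by simp [icr_succ_y blocks x y z xe ye bn ss hy, hinv, hc])
      · rw [if_neg hc, if_neg hc]
        exact ⟨rfl, hy, hinv⟩

lemma lockZ (blocks : List (Int × Int × Int × String × String)) (x y z xe ye : Int) (bn ss : String) :
    ∀ (f : Nat) (ze : Int), z ≤ ze → pvIcr blocks x y z xe ye ze bn ss = true →
      pvWhileZ blocks x y z xe ye bn ss f ze
          = pvExtend (pvDict blocks) (bn, ss)
              (fun k => (PySem.List.pyRange x (xe + 1) 1).flatMap fun i =>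
                (PySem.List.pyRange y (ye + 1) 1).map fun j => (i, j, k)) f ze := by
  intro f
  induction f with
  | zero => intro ze hz hinv; rfl
  | succ f ih =>
      intro ze hz hinv
      simp only [pvWhileZ, pvExtend, slabAll_eq]
      rw [icr_succ_z blocks x y z xe ye ze bn ss hz, hinv, Bool.true_and]
      by_cases hc : pvSlabAll blocks bn ss x xe y ye (ze + 1) = true
      · rw [if_pos hc, if_pos hc]
        exact ih (ze + 1) (by omega)
          (by simp [icr_succ_z blocks x y z xe ye ze bn ss hz, hinv, hc])
      · rw [if_neg hc, if_neg hc]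

lemma whileX_bad (blocks : List (Int × Int × Int × String × String)) (x y z : Int) (bn ss : String)
    (h : pvCellOk blocks bn ss x y z = false) (f : Nat) :
    pvWhileX blocks x y z bn ss f x = x := by
  cases f with
  | zero => rfl
  | succ f =>
      simp only [pvWhileX, icr_succ_x blocks x y z x bn ss le_rfl, icr_self, h,
        Bool.false_and, Bool.false_eq_true, if_neg, not_false_iff]

lemma whileY_bad (blocks : List (Int × Int × Int × String × String)) (x y z : Int) (bn ss : String)
    (h : pvCellOk blocks bn ss x y z = false) (f : Nat) :
    pvWhileY blocks x y z x bn ss f y = y := by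
  cases f with
  | zero => rfl
  | succ f =>
      simp only [pvWhileY, icr_succ_y blocks x y z x y bn ss le_rfl, icr_self, h,
        Bool.false_and, Bool.false_eq_true, if_neg, not_false_iff]

lemma whileZ_bad (blocks : List (Int × Int × Int × String × String)) (x y z : Int) (bn ss : String)
    (h : pvCellOk blocks bn ss x y z = false) (f : Nat) :
    pvWhileZ blocks x y z x y bn ss f z = z := by
  cases f with
  | zero => rfl
  | succ f =>
      simp only [pvWhileZ, icr_succ_z blocks x y z x y z bn ss le_rfl, icr_self, h,
        Bool.false_and, Bool.false_eq_true, if_neg, not_false_iff]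

-- ===== VERDICT =====
theorem find_largest_region_spec : Claim_equal_find_largest_region := by
  intro blocks start bn ss _
  unfold Spec_find_largest_region
  obtain ⟨x, y, z⟩ := start
  show find_largest_region blocks (x, y, z) bn ss = find_largest_region_alt blocks (x, y, z) bn ss
  unfold find_largest_region find_largest_region_alt
  simp only [get?_pvDict]
  by_cases h : pvCellOk blocks bn ss x y z = true
  · simp only [h, if_pos]
    obtain ⟨hX, hxle, hXinv⟩ :=
      lockX blocks x y z bn ss (blocks.length + 1) x le_rfl (by rw [icr_self, h])
    obtain ⟨hY, hyle, hYinv⟩ :=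
      lockY blocks x y z (pvWhileX blocks x y z bn ss (blocks.length + 1) x) bn ss
        (blocks.length + 1) y le_rfl hXinv
    have hZ :=
      lockZ blocks x y z (pvWhileX blocks x y z bn ss (blocks.length + 1) x)
        (pvWhileY blocks x y z (pvWhileX blocks x y z bn ss (blocks.length + 1) x) bn ss (blocks.length + 1) y)
        bn ss (blocks.length + 1) z le_rfl hYinv
    simp only [hX] at hY hZ ⊢
    simp only [hY] at hZ ⊢
    simp only [hZ]
  · simp only [Bool.not_eq_true] at h
    simp only [h, Bool.false_eq_true, if_neg, not_false_iff]
    rw [whileX_bad blocks x y z bn ss h, whileY_bad blocks x y z bn ss h,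
        whileZ_bad blocks x y z bn ss h]
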